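-- pv_equiv track=rewrite | github.com/Javis1205/cpa_report-1 | Action/vglib.py | get_op_tables
-- ===== SOURCE A (Python) =====
-- def find_op_table(estore_id):
-- 	t = int(estore_id) % 20
-- 	return 'orders_product_{}'.format(t)
--
-- def get_op_tables(records, estore_index, index):
-- 	op_tables = {
-- 		'orders_product_0':[],
-- 		'orders_product_1':[],
-- 		'orders_product_2':[],
-- 		'orders_product_3':[],
-- 		'orders_product_4':[],
-- 		'orders_product_5':[],
-- 		'orders_product_6':[],
-- 		'orders_product_7':[],
-- 		'orders_product_8':[],
-- 		'orders_product_9':[],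
-- 		'orders_product_10':[],
-- 		'orders_product_11':[],
-- 		'orders_product_12':[],
-- 		'orders_product_13':[],
-- 		'orders_product_14':[],
-- 		'orders_product_15':[],
-- 		'orders_product_16':[],
-- 		'orders_product_17':[],
-- 		'orders_product_18':[],
-- 		'orders_product_19':[],
-- 	}
--
-- 	# determine orders_product_x
-- 	# append only the r[index] (supposed to be the ord_id) into corresponding list
-- 	for r in records:
-- 		op_tables[find_op_table(r[estore_index])].append(r[index])
--
-- 	return op_tables
-- ===== SOURCE B (Python) =====
-- def get_op_tables(records, estore_index, index):
--     # 20 filtering passes (one per bucket) instead of A's single scatter pass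
--     return {
--         'orders_product_{}'.format(t):
--             [r[index] for r in records if int(r[estore_index]) % 20 == t]
--         for t in range(20)
--     }
-- ===== Notes on version B (the rewrite author's own statement) =====
-- stated objective: alternative
-- what changed: A does one scatter pass appending each record into a pre-built 20-key dict; B builds the dict as a comprehension over the 20 buckets, each bucket produced by its own filter-and-project pass over records.
import Mathlib
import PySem

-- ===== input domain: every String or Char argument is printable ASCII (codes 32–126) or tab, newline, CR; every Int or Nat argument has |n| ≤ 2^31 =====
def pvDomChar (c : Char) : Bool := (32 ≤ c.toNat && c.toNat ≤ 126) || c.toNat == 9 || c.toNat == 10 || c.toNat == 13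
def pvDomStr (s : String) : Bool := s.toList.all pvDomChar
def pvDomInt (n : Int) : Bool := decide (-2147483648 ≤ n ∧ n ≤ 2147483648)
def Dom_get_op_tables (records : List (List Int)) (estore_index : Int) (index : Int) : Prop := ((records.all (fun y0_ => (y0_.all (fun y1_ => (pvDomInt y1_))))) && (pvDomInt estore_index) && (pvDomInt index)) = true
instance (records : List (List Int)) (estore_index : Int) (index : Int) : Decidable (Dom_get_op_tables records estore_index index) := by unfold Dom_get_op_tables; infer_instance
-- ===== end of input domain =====

-- B replaces A's single scatter pass into a pre-built 20-key dict by a comprehension over the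
-- 20 buckets, one filter-and-project pass per bucket (objective: alternative decomposition).

-- ===== PORT A =====
def find_op_table (estore_id : Int) : String :=
  let t := PySem.Int.mod estore_id 20
  "orders_product_" ++ PySem.Int.toStr t

-- Under Pre_ every index is in range, so the `.getD 0` defaults of pyGet? are never used;
-- `Dict.modify` matches `op_tables[k].append(...)` because the key is always one of the 20 present keys.
def get_op_tables (records : List (List Int)) (estore_index : Int) (index : Int) : List (String × List Int) :=
  (records.foldl
    (fun d r => d.modify (find_op_table ((PySem.List.pyGet? r estore_index).getD 0)) []
      (fun l => l ++ [(PySem.List.pyGet? r index).getD 0]))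
    (PySem.Dict.ofList
    [ ("orders_product_0", []), ("orders_product_1", []), ("orders_product_2", []),
      ("orders_product_3", []), ("orders_product_4", []), ("orders_product_5", []),
      ("orders_product_6", []), ("orders_product_7", []), ("orders_product_8", []),
      ("orders_product_9", []), ("orders_product_10", []), ("orders_product_11", []),
      ("orders_product_12", []), ("orders_product_13", []), ("orders_product_14", []),
      ("orders_product_15", []), ("orders_product_16", []), ("orders_product_17", []),
      ("orders_product_18", []), ("orders_product_19", []) ])).items

-- ===== PORT B =====
def get_op_tables_alt (records : List (List Int)) (estore_index : Int) (index : Int) : List (String × List Int) :=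
  (PySem.List.pyRange 0 20 1).map (fun t =>
    ("orders_product_" ++ PySem.Int.toStr t,
      (records.filter (fun r =>
          PySem.Int.mod ((PySem.List.pyGet? r estore_index).getD 0) 20 == t)).map
        (fun r => (PySem.List.pyGet? r index).getD 0)))

-- ===== PRECONDITION & SPEC =====
-- Pre_: exactly the inputs where Python A returns (both r[estore_index] and r[index] in range for every record).
def Pre_get_op_tables (records : List (List Int)) (estore_index : Int) (index : Int) : Prop :=
  ∀ r ∈ records, PySem.Raise.InRange r.length estore_index ∧ PySem.Raise.InRange r.length index
instance (records : List (List Int)) (estore_index : Int) (index : Int) : Decidable (Pre_get_op_tables records estore_index index) := by unfold Pre_get_op_tables; infer_instance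

def pvWitness_get_op_tables : List (List Int) × Int × Int := ([[5, 7], [23, 9]], 0, 1)

def Spec_get_op_tables (records : List (List Int)) (estore_index : Int) (index : Int) (out : List (String × List Int)) : Prop := out = get_op_tables_alt records estore_index index
instance (records : List (List Int)) (estore_index : Int) (index : Int) (out : List (String × List Int)) : Decidable (Spec_get_op_tables records estore_index index out) := by unfold Spec_get_op_tables; infer_instance

-- ===== CLAIM (what is proved, stated in full; the proofs are below) =====
def Claim_equal_get_op_tables : Prop := ∀ (records : List (List Int)) (estore_index : Int) (index : Int), Dom_get_op_tables records estore_index index → Pre_get_op_tables records estore_index index → Spec_get_op_tables records estore_index index (get_op_tables records estore_index index)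

-- ===== LEMMAS AND PROOFS =====

-- proof-side name for the bucket key string
def opKey (t : Int) : String := "orders_product_" ++ PySem.Int.toStr t

theorem k0 : opKey 0 = "orders_product_0" := by decide
theorem k1 : opKey 1 = "orders_product_1" := by decide
theorem k2 : opKey 2 = "orders_product_2" := by decide
theorem k3 : opKey 3 = "orders_product_3" := by decide
theorem k4 : opKey 4 = "orders_product_4" := by decide
theorem k5 : opKey 5 = "orders_product_5" := by decide
theorem k6 : opKey 6 = "orders_product_6" := by decide
theorem k7 : opKey 7 = "orders_product_7" := by decide
theorem k8 : opKey 8 = "orders_product_8" := by decide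
theorem k9 : opKey 9 = "orders_product_9" := by decide
theorem k10 : opKey 10 = "orders_product_10" := by decide
theorem k11 : opKey 11 = "orders_product_11" := by decide
theorem k12 : opKey 12 = "orders_product_12" := by decide
theorem k13 : opKey 13 = "orders_product_13" := by decide
theorem k14 : opKey 14 = "orders_product_14" := by decide
theorem k15 : opKey 15 = "orders_product_15" := by decide
theorem k16 : opKey 16 = "orders_product_16" := by decide
theorem k17 : opKey 17 = "orders_product_17" := by decide
theorem k18 : opKey 18 = "orders_product_18" := by decide
theorem k19 : opKey 19 = "orders_product_19" := by decide

-- the 20-bucket table as a function of the bucket contents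
def opTable (g : Int → List Int) : PySem.Dict String (List Int) :=
  PySem.Dict.mk
    [ (opKey 0, g 0), (opKey 1, g 1), (opKey 2, g 2), (opKey 3, g 3), (opKey 4, g 4),
      (opKey 5, g 5), (opKey 6, g 6), (opKey 7, g 7), (opKey 8, g 8), (opKey 9, g 9),
      (opKey 10, g 10), (opKey 11, g 11), (opKey 12, g 12), (opKey 13, g 13), (opKey 14, g 14),
      (opKey 15, g 15), (opKey 16, g 16), (opKey 17, g 17), (opKey 18, g 18), (opKey 19, g 19) ]

theorem opTable_congr {g g' : Int → List Int} (h : ∀ t, 0 ≤ t → t < 20 → g t = g' t) :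
    opTable g = opTable g' := by
  unfold opTable
  rw [h 0 (by omega) (by omega), h 1 (by omega) (by omega), h 2 (by omega) (by omega),
      h 3 (by omega) (by omega), h 4 (by omega) (by omega), h 5 (by omega) (by omega),
      h 6 (by omega) (by omega), h 7 (by omega) (by omega), h 8 (by omega) (by omega),
      h 9 (by omega) (by omega), h 10 (by omega) (by omega), h 11 (by omega) (by omega),
      h 12 (by omega) (by omega), h 13 (by omega) (by omega), h 14 (by omega) (by omega),
      h 15 (by omega) (by omega), h 16 (by omega) (by omega), h 17 (by omega) (by omega),
      h 18 (by omega) (by omega), h 19 (by omega) (by omega)]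

theorem modify_opTable (g : Int → List Int) (f : List Int → List Int) (s : Int)
    (h0 : 0 ≤ s) (h1 : s < 20) :
    (opTable g).modify (opKey s) [] f = opTable (fun t => if t = s then f (g t) else g t) := by
  have hs : s = 0 ∨ s = 1 ∨ s = 2 ∨ s = 3 ∨ s = 4 ∨ s = 5 ∨ s = 6 ∨ s = 7 ∨ s = 8 ∨ s = 9 ∨
      s = 10 ∨ s = 11 ∨ s = 12 ∨ s = 13 ∨ s = 14 ∨ s = 15 ∨ s = 16 ∨ s = 17 ∨ s = 18 ∨ s = 19 := by
    omega
  rcases hs with h|h|h|h|h|h|h|h|h|h|h|h|h|h|h|h|h|h|h|h <;> subst h <;>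
    simp [opTable, k0, k1, k2, k3, k4, k5, k6, k7, k8, k9, k10, k11, k12, k13, k14, k15, k16,
          k17, k18, k19, PySem.Dict.modify, PySem.Dict.insert, PySem.Dict.contains,
          PySem.Dict.getD, PySem.Dict.get?]

-- B's per-bucket pass, named
def bucket (records : List (List Int)) (estore_index index t : Int) : List Int :=
  (records.filter (fun r =>
      PySem.Int.mod ((PySem.List.pyGet? r estore_index).getD 0) 20 == t)).map
    (fun r => (PySem.List.pyGet? r index).getD 0)

theorem bucket_nil (ei i t : Int) : bucket [] ei i t = [] := rfl

theorem bucket_cons (r : List Int) (rs : List (List Int)) (ei i t : Int) :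
    bucket (r :: rs) ei i t =
      (if (PySem.Int.mod ((PySem.List.pyGet? r ei).getD 0) 20 == t) = true
        then [(PySem.List.pyGet? r i).getD 0] else []) ++ bucket rs ei i t := by
  simp only [bucket, List.filter_cons]
  split <;> simp

theorem fold_items (ei i : Int) (records : List (List Int)) : ∀ (g : Int → List Int),
    records.foldl
      (fun d r => d.modify (find_op_table ((PySem.List.pyGet? r ei).getD 0)) []
        (fun l => l ++ [(PySem.List.pyGet? r i).getD 0])) (opTable g)
    = opTable (fun t => g t ++ bucket records ei i t) := by
  induction records with
  | nil =>
    intro g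
    simp only [List.foldl_nil, bucket_nil]
    exact (opTable_congr (fun t _ _ => by simp)).symm
  | cons r rs ih =>
    intro g
    simp only [List.foldl_cons]
    set e : Int := (PySem.List.pyGet? r ei).getD 0 with he
    set x : Int := (PySem.List.pyGet? r i).getD 0 with hx
    have hk : find_op_table e = opKey (PySem.Int.mod e 20) := rfl
    rw [hk, modify_opTable g _ _ (PySem.Int.mod_nonneg e (by omega))
          (PySem.Int.mod_lt e (by omega)), ih]
    apply opTable_congr
    intro t _ _
    rw [bucket_cons]
    by_cases h : PySem.Int.mod e 20 = t
    · rw [if_pos h.symm, if_pos (beq_iff_eq.mpr h)]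
      simp only [← hx, List.append_assoc]
    · rw [if_neg (fun hh => h hh.symm), if_neg (fun hb => h (beq_iff_eq.mp hb))]
      simp

theorem init_eq : PySem.Dict.ofList
    [ ("orders_product_0", ([] : List Int)), ("orders_product_1", []), ("orders_product_2", []),
      ("orders_product_3", []), ("orders_product_4", []), ("orders_product_5", []),
      ("orders_product_6", []), ("orders_product_7", []), ("orders_product_8", []),
      ("orders_product_9", []), ("orders_product_10", []), ("orders_product_11", []),
      ("orders_product_12", []), ("orders_product_13", []), ("orders_product_14", []),
      ("orders_product_15", []), ("orders_product_16", []), ("orders_product_17", []),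
      ("orders_product_18", []), ("orders_product_19", []) ]
    = opTable (fun _ => []) := by decide

theorem alt_eq (records : List (List Int)) (ei i : Int) :
    get_op_tables_alt records ei i = (opTable (fun t => bucket records ei i t)).items := by
  have hr : PySem.List.pyRange 0 20 1 =
      [0, 1, 2, 3, 4, 5, 6, 7, 8, 9, 10, 11, 12, 13, 14, 15, 16, 17, 18, 19] := by decide
  simp [get_op_tables_alt, opTable, bucket, opKey, hr]

-- ===== VERDICT (by name: the statement is the Claim_ definition above) =====
theorem get_op_tables_spec : Claim_equal_get_op_tables := by
  intro records estore_index index _ _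
  unfold Spec_get_op_tables get_op_tables
  rw [init_eq, fold_items, alt_eq]
  exact congrArg PySem.Dict.items (opTable_congr (fun t _ _ => by simp))
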